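-- pv_equiv track=rewrite | github.com/DexterInd/GoPiGo3 | Projects/Pixy2LaneTracker/pixy2.py | unpack_bytes
-- ===== SOURCE A (Python) =====
-- def unpack_bytes(bytes_list,
--                  big_endian=True):
--     """
--     Unpack integers from a given list of bytes.
--
--     :param bytes_list: List of numbers of whose elements don't go over 255.
--     :param big_endian: Whether it's big endian or little endian.
--     :return: The unpacked number.
--     """
--     out = 0
--     multiplier = 1
--     if big_endian:
--         bytes_list = bytes_list[::-1]
--     for byte_number in bytes_list:
--         out += byte_number * multiplier
--         multiplier <<= 8
--
--     return out
-- ===== SOURCE B (Python) =====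
-- from functools import reduce
--
-- def unpack_bytes(bytes_list, big_endian=True):
--     """Horner's method: one accumulator, no multiplier variable."""
--     seq = bytes_list if big_endian else reversed(bytes_list)
--     return reduce(lambda acc, b: acc * 256 + b, seq, 0)
-- ===== Notes on version B (the rewrite author's own statement) =====
-- stated objective: simpler
-- what changed: Replaces the reverse-then-positional-sum loop with separate (out, multiplier) state by a single-accumulator Horner fold acc*256+b (functools.reduce), choosing iteration direction instead of copying the list.
import Mathlib
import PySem

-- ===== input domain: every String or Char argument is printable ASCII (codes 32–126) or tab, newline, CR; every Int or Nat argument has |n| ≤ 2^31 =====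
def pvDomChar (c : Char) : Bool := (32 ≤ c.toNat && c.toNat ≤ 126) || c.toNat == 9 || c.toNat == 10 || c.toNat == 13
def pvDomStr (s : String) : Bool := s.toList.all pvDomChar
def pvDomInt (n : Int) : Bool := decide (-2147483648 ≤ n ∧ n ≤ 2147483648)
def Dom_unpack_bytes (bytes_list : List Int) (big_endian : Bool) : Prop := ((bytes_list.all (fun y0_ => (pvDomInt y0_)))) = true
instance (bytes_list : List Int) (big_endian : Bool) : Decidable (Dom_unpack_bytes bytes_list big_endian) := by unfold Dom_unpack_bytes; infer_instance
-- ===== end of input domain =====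

-- B replaces A's reverse-then-positional-sum (separate out/multiplier state) by a single-accumulator Horner fold; same O(n) cost, simpler.


-- ===== PORT A =====
-- Literal port of A: bytes_list[::-1] when big_endian, then a loop over (out, multiplier)
-- with out += byte * multiplier; multiplier <<= 8.
def unpack_bytes (bytes_list : List Int) (big_endian : Bool) : Int :=
  let bl := if big_endian then (PySem.List.slice? bytes_list none none (-1)).getD [] else bytes_list
  (bl.foldl (fun (st : Int × Int) byte_number => (st.1 + byte_number * st.2, st.2 <<< 8)) (0, 1)).1

-- ===== PORT B =====
-- Port of B: Horner fold acc*256 + b over the list (reversed when little-endian).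
def unpack_bytes_alt (bytes_list : List Int) (big_endian : Bool) : Int :=
  let seq := if big_endian then bytes_list else bytes_list.reverse
  seq.foldl (fun acc b => acc * 256 + b) 0

-- ===== PRECONDITION & SPEC =====
def Spec_unpack_bytes (bytes_list : List Int) (big_endian : Bool) (out : Int) : Prop := out = unpack_bytes_alt bytes_list big_endian
instance (bytes_list : List Int) (big_endian : Bool) (out : Int) : Decidable (Spec_unpack_bytes bytes_list big_endian out) := by unfold Spec_unpack_bytes; infer_instance

-- ===== CLAIM (what is proved, stated in full; the proofs are below) =====
def Claim_equal_unpack_bytes : Prop := ∀ (bytes_list : List Int) (big_endian : Bool), Dom_unpack_bytes bytes_list big_endian → Spec_unpack_bytes bytes_list big_endian (unpack_bytes bytes_list big_endian)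

-- ===== LEMMAS AND PROOFS =====

-- little-endian value of a byte list: b0 + 256*(b1 + 256*(...))
def pvLittle : List Int → Int
  | [] => 0
  | b :: t => b + 256 * pvLittle t

theorem pvLittle_append (xs : List Int) (b : Int) :
    pvLittle (xs ++ [b]) = pvLittle xs + b * 256 ^ xs.length := by
  induction xs with
  | nil => simp [pvLittle]
  | cons h t ih => simp [pvLittle, ih, List.length_cons]; ring

-- A's pair fold computes o + m * pvLittle l
theorem pvA_fold (l : List Int) (o m : Int) :
    (l.foldl (fun (st : Int × Int) byte_number => (st.1 + byte_number * st.2, st.2 <<< 8)) (o, m)).1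
      = o + m * pvLittle l := by
  induction l generalizing o m with
  | nil => simp [pvLittle]
  | cons h t ih =>
      simp only [List.foldl_cons, ih, pvLittle]
      have : m <<< 8 = m * 256 := by
        rw [show (8:ℤ) = ((8:ℕ):ℤ) from rfl, Int.shiftLeft_eq_mul_pow]; norm_num
      rw [this]; ring

-- B's Horner fold computes a * 256^|l| + pvLittle l.reverse
theorem pvB_fold (l : List Int) (a : Int) :
    l.foldl (fun acc b => acc * 256 + b) a = a * 256 ^ l.length + pvLittle l.reverse := by
  induction l generalizing a with
  | nil => simp [pvLittle]
  | cons h t ih =>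
      simp only [List.foldl_cons, ih, List.reverse_cons, pvLittle_append, List.length_reverse,
        List.length_cons]
      ring

-- ===== VERDICT (by name: the statement is the Claim_ definition above) =====
theorem unpack_bytes_spec : Claim_equal_unpack_bytes := by
  intro bytes_list big_endian _
  unfold Spec_unpack_bytes unpack_bytes unpack_bytes_alt
  have hslice : (PySem.List.slice? bytes_list none none (-1)).getD [] = bytes_list.reverse := by
    rw [PySem.List.slice?_none_none_neg_one]; rfl
  cases big_endian with
  | false =>
      simp only [Bool.false_eq_true, if_false]
      rw [pvA_fold, pvB_fold]
      simp [List.reverse_reverse]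
  | true =>
      simp only [if_true, hslice]
      rw [pvA_fold, pvB_fold]
      simp
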